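-- pv_equiv track=rewrite | github.com/affu-79/PII-SENTINEL-BACKEND | backend/pii_detector_docx.py | _categorize_detections
-- ===== SOURCE A (Python) =====
-- from typing import List, Dict
--
-- def _categorize_detections(detections: List[Dict]) -> Dict:
--     """Categorize detections by type and category"""
--     categorized = {}
--
--     for detection in detections:
--         category = detection['category']
--         pii_type = detection['type']
--
--         if category not in categorized:
--             categorized[category] = {}
--
--         if pii_type not in categorized[category]:
--             categorized[category][pii_type] = []
--
--         categorized[category][pii_type].append(detection)
--
--     return categorized
-- ===== SOURCE B (Python) =====
-- from typing import List, Dict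
--
-- def _group_by(items, key):
--     """Group an iterable into an insertion-ordered dict of lists by a key function."""
--     groups = {}
--     for item in items:
--         groups.setdefault(key(item), []).append(item)
--     return groups
--
-- def _categorize_detections(detections: List[Dict]) -> Dict:
--     """Categorize detections by type and category"""
--     by_category = _group_by(detections, lambda d: d['category'])
--     return {cat: _group_by(items, lambda d: d['type'])
--             for cat, items in by_category.items()}
-- ===== Notes on version B (the rewrite author's own statement) =====
-- stated objective: simpler
-- what changed: Replaces A's single loop that conditionally creates nested dict levels in place with a generic ordered group-by helper applied twice: once over all detections keyed by category, then mapped over each category's list keyed by type.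
import Mathlib
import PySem

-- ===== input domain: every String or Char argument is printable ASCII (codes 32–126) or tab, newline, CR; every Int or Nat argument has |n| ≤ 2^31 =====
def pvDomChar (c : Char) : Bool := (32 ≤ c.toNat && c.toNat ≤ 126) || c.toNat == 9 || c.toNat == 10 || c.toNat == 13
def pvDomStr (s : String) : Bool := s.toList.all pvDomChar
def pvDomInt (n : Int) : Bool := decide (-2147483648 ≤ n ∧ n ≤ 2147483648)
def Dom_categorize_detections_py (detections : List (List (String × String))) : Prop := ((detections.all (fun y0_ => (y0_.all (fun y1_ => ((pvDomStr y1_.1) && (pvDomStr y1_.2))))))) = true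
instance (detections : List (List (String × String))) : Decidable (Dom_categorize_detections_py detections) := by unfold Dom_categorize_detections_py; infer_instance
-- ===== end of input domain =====

-- B groups with a generic ordered group-by helper applied twice (outer by category, then
-- each category's list by type) instead of A's single loop over a nested dict; equal results.

-- Association-list primitives shared by both ports (exact for Python dicts here: every
-- dict built below has unique keys, so first-match lookup / in-place overwrite are exact).

-- d.get(k): first match
def dget? {β : Type} (d : List (String × β)) (k : String) : Option β :=
  match d with
  | [] => none
  | (k', v) :: r => if k' = k then some v else dget? r k

-- d[k] = v: overwrite in place, new keys append
def dset {β : Type} (d : List (String × β)) (k : String) (v : β) : List (String × β) :=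
  match d with
  | [] => [(k, v)]
  | (k', v') :: r => if k' = k then (k, v) :: r else (k', v') :: dset r k v

-- ===== PORT A =====
-- d[k].append(x) (A only appends when k is present)
def dapp {α : Type} (d : List (String × List α)) (k : String) (x : α) : List (String × List α) :=
  match d with
  | [] => []
  | (k', vs) :: r => if k' = k then (k', vs ++ [x]) :: r else (k', vs) :: dapp r k x

-- one iteration of A's loop body
def stepA (categorized : List (String × List (String × List (List (String × String)))))
    (detection : List (String × String)) :
    List (String × List (String × List (List (String × String)))) :=
  let category := (dget? detection "category").getD ""   -- detection['category'] (exists under Pre_)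
  let pii_type := (dget? detection "type").getD ""       -- detection['type'] (exists under Pre_)
  let c1 := if (dget? categorized category).isNone then dset categorized category [] else categorized
  let inner := (dget? c1 category).getD []
  let inner1 := if (dget? inner pii_type).isNone then dset inner pii_type [] else inner
  dset c1 category (dapp inner1 pii_type detection)

def categorize_detections_py (detections : List (List (String × String))) :
    List (String × List (String × List (List (String × String)))) :=
  detections.foldl stepA []

-- ===== PORT B =====
-- groups.setdefault(k, []).append(x): extend the entry for k, or append a fresh entry
def gadd {α : Type} (g : List (String × List α)) (k : String) (x : α) : List (String × List α) :=
  match g with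
  | [] => [(k, [x])]
  | (k', vs) :: r => if k' = k then (k', vs ++ [x]) :: r else (k', vs) :: gadd r k x

-- _group_by(items, key)
def groupByKey {α : Type} (key : α → String) (items : List α) : List (String × List α) :=
  items.foldl (fun g item => gadd g (key item) item) []

def categorize_detections_py_alt (detections : List (List (String × String))) :
    List (String × List (String × List (List (String × String)))) :=
  (groupByKey (fun d => (dget? d "category").getD "") detections).map
    (fun p => (p.1, groupByKey (fun d => (dget? d "type").getD "") p.2))

-- ===== PRECONDITION & SPEC =====
-- Pre_ excludes detections lacking a 'category' or 'type' key: Python A raises KeyError there.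
def Pre_categorize_detections_py (detections : List (List (String × String))) : Prop :=
  ∀ d ∈ detections, "category" ∈ d.map Prod.fst ∧ "type" ∈ d.map Prod.fst
instance (detections : List (List (String × String))) : Decidable (Pre_categorize_detections_py detections) := by unfold Pre_categorize_detections_py; infer_instance

def pvWitness_categorize_detections_py : (List (List (String × String))) :=
  [[("category", "PERSONAL"), ("type", "EMAIL"), ("value", "a@b.c")]]

def Spec_categorize_detections_py (detections : List (List (String × String))) (out : List (String × List (String × List (List (String × String))))) : Prop := out = categorize_detections_py_alt detections
instance (detections : List (List (String × String))) (out : List (String × List (String × List (List (String × String))))) : Decidable (Spec_categorize_detections_py detections out) := by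
  unfold Spec_categorize_detections_py
  have h1 : DecidableEq (List (List (String × String))) := inferInstance
  have h2 : DecidableEq (List (String × List (List (String × String)))) := inferInstance
  have h3 : DecidableEq (List (String × List (String × List (List (String × String))))) := inferInstance
  exact h3 _ _

-- ===== CLAIM (what is proved, stated in full; the proofs are below) =====
def Claim_equal_categorize_detections_py : Prop := ∀ (detections : List (List (String × String))), Dom_categorize_detections_py detections → Pre_categorize_detections_py detections → Spec_categorize_detections_py detections (categorize_detections_py detections)

-- ===== LEMMAS AND PROOFS =====

-- map h over the values of an association list
def mapv {β γ : Type} (h : β → γ) (g : List (String × β)) : List (String × γ) :=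
  g.map (fun p => (p.1, h p.2))

-- inner step of A collapses to B's gadd
theorem dapp_dset_eq_gadd {α : Type} (t : List (String × List α)) (k : String) (x : α) :
    dapp (if (dget? t k).isNone then dset t k [] else t) k x = gadd t k x := by
  induction t with
  | nil => simp [dget?, dset, dapp, gadd]
  | cons p r ih =>
    obtain ⟨k', vs⟩ := p
    by_cases hk : k' = k
    · subst hk; simp [dget?, dapp, gadd]
    · cases hr : (dget? r k).isNone
      · simpa [dget?, dset, dapp, gadd, hk, hr] using ih
      · simpa [dget?, dset, dapp, gadd, hk, hr] using ih

-- A's step skips a head entry with a different category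
theorem stepA_cons_ne (D : List (String × List (String × List (List (String × String)))))
    (k : String) (w : List (String × List (List (String × String)))) (det : List (String × String))
    (h : ¬ (dget? det "category").getD "" = k) :
    stepA ((k, w) :: D) det = (k, w) :: stepA D det := by
  have hk : ¬ k = (dget? det "category").getD "" := fun e => h e.symm
  cases hD : (dget? D ((dget? det "category").getD "")).isNone
  · simp [stepA, dget?, dset, hk, hD]
  · simp [stepA, dget?, dset, hk, hD]

-- A's step when the head entry is the detection's category
theorem stepA_cons_eq (D : List (String × List (String × List (List (String × String)))))
    (w : List (String × List (List (String × String)))) (det : List (String × String)) :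
    stepA (((dget? det "category").getD "", w) :: D) det
      = ((dget? det "category").getD "", gadd w ((dget? det "type").getD "") det) :: D := by
  simp only [stepA]
  rw [dapp_dset_eq_gadd]
  simp [dget?, dset]

-- A's step on the value-mapped outer grouping is B's outer gadd, value-mapped
theorem stepA_mapv (g : List (String × List (List (String × String)))) (det : List (String × String)) :
    stepA (mapv (groupByKey (fun d => (dget? d "type").getD "")) g) det
      = mapv (groupByKey (fun d => (dget? d "type").getD ""))
          (gadd g ((dget? det "category").getD "") det) := by
  induction g with
  | nil => simp [mapv, stepA, gadd, groupByKey, dget?, dset, dapp]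
  | cons p r ih =>
    obtain ⟨k, vs⟩ := p
    by_cases hk : (dget? det "category").getD "" = k
    · subst hk
      rw [show mapv (groupByKey (fun d => (dget? d "type").getD ""))
            (((dget? det "category").getD "", vs) :: r)
          = ((dget? det "category").getD "", groupByKey (fun d => (dget? d "type").getD "") vs)
              :: mapv (groupByKey (fun d => (dget? d "type").getD "")) r from rfl,
        stepA_cons_eq]
      simp [gadd, mapv, groupByKey, List.foldl_append]
    · rw [show mapv (groupByKey (fun d => (dget? d "type").getD "")) ((k, vs) :: r)
          = (k, groupByKey (fun d => (dget? d "type").getD "") vs)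
              :: mapv (groupByKey (fun d => (dget? d "type").getD "")) r from rfl,
        stepA_cons_ne _ _ _ _ hk, ih]
      have hk' : ¬ k = (dget? det "category").getD "" := fun e => hk e.symm
      simp [gadd, mapv, hk']

-- the whole of A's fold is B's two-level grouping
theorem foldA_eq (xs : List (List (String × String))) :
    xs.foldl stepA [] = mapv (groupByKey (fun d => (dget? d "type").getD ""))
      (groupByKey (fun d => (dget? d "category").getD "") xs) := by
  induction xs using List.reverseRecOn with
  | nil => rfl
  | append_singleton ys x ih =>
    rw [List.foldl_append, List.foldl_cons, List.foldl_nil, ih, stepA_mapv]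
    simp [groupByKey, List.foldl_append]

-- ===== VERDICT (by name: the statement is the Claim_ definition above) =====
theorem categorize_detections_py_spec : Claim_equal_categorize_detections_py := by
  intro detections _ _
  unfold Spec_categorize_detections_py categorize_detections_py categorize_detections_py_alt
  rw [foldA_eq]
  rfl
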